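-- pv_equiv track=rewrite | github.com/deepthiii33/Brainwave_Matrix_Intern_advanced-password-checker | CLI/password_checker.py | normalize_leet
-- ===== SOURCE A (Python) =====
-- def normalize_leet(password):
--     substitutions = {
--         '@': 'a', '0': 'o', '1': 'l', '$': 's', '3': 'e', '4': 'a', '5': 's', '7': 't', '!': 'i'
--     }
--     normalized = password.lower()
--     for k, v in substitutions.items():
--         normalized = normalized.replace(k, v)
--     return normalized
-- ===== SOURCE B (Python) =====
-- def normalize_leet(password):
--     subs = {
--         '@': 'a', '0': 'o', '1': 'l', '$': 's', '3': 'e', '4': 'a', '5': 's', '7': 't', '!': 'i'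
--     }
--     return ''.join(subs.get(c, c) for c in password.lower())
-- ===== Notes on version B (the rewrite author's own statement) =====
-- stated objective: simpler
-- what changed: Replaces nine sequential whole-string .replace() scans with a single character-by-character pass doing one dict lookup per character (exact because no replacement value is itself a key).
import Mathlib
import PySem

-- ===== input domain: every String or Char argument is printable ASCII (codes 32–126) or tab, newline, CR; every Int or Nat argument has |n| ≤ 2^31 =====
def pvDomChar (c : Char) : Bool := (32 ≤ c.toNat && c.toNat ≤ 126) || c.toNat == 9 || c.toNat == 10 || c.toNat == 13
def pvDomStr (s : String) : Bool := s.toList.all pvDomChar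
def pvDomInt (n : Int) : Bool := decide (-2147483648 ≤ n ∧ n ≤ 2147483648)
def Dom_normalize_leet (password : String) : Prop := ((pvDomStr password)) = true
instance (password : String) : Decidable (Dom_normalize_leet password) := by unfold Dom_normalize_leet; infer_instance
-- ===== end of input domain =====

-- B replaces A's nine sequential whole-string .replace() scans by one char-by-char pass
-- with a table lookup per character (objective: simpler; exact since no value is a key).

-- ===== PORT A =====
def normalize_leet (password : String) : String :=
  let substitutions : List (String × String) :=
    [("@", "a"), ("0", "o"), ("1", "l"), ("$", "s"), ("3", "e"),
     ("4", "a"), ("5", "s"), ("7", "t"), ("!", "i")]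
  let normalized := PySem.Str.lower password
  substitutions.foldl (fun acc kv => PySem.Str.replace acc kv.1 kv.2) normalized

-- ===== PORT B =====
def normalize_leet_alt (password : String) : String :=
  let subs : PySem.Dict Char Char := PySem.Dict.mk
    [('@', 'a'), ('0', 'o'), ('1', 'l'), ('$', 's'), ('3', 'e'),
     ('4', 'a'), ('5', 's'), ('7', 't'), ('!', 'i')]
  String.ofList ((PySem.Str.lower password).toList.map (fun c => subs.getD c c))

-- ===== PRECONDITION & SPEC =====
def Spec_normalize_leet (password : String) (out : String) : Prop := out = normalize_leet_alt password
instance (password : String) (out : String) : Decidable (Spec_normalize_leet password out) := by unfold Spec_normalize_leet; infer_instance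

-- ===== CLAIM (what is proved, stated in full; the proofs are below) =====
def Claim_equal_normalize_leet : Prop := ∀ (password : String), Dom_normalize_leet password → Spec_normalize_leet password (normalize_leet password)

-- ===== LEMMAS AND PROOFS =====

/-- One single-character substitution, as a function on characters. -/
def leetSub (k v x : Char) : Char := if x = k then v else x

/-- `replace.go` with a single-char pattern is a pointwise map (given enough fuel). -/
lemma replace_go_single (k v : Char) :
    ∀ (fuel : Nat) (l acc : List Char), l.length ≤ fuel →
      PySem.Chars.replace.go [k] [v] fuel l acc =
        acc.reverse ++ l.map (leetSub k v) := by
  intro fuel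
  induction fuel with
  | zero =>
    intro l acc h
    have : l = [] := List.length_eq_zero_iff.mp (Nat.le_zero.mp h)
    subst this
    simp [PySem.Chars.replace.go]
  | succ n ih =>
    intro l acc h
    cases l with
    | nil => simp [PySem.Chars.replace.go]
    | cons c t =>
      simp only [PySem.Chars.replace.go]
      by_cases hc : c = k
      · subst hc
        have hpre : [c].isPrefixOf (c :: t) = true := by simp [List.isPrefixOf]
        rw [if_pos hpre]
        simp only [List.length_cons, List.length_nil, List.drop_succ_cons, List.drop_zero]
        rw [ih t ([v].reverse ++ acc) (Nat.le_of_succ_le_succ (by simpa using h))]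
        simp [leetSub]
      · have hpre : [k].isPrefixOf (c :: t) = false := by
          simp [List.isPrefixOf]
          exact fun hx => (hc hx.symm).elim
        rw [hpre]
        simp only [Bool.false_eq_true, if_false]
        rw [ih t (c :: acc) (Nat.le_of_succ_le_succ h)]
        simp [leetSub, hc]

/-- Single-char `replace` is a map over the characters. -/
lemma replace_single (k v : Char) (l : List Char) :
    PySem.Chars.replace l [k] [v] = l.map (leetSub k v) := by
  rw [PySem.Chars.replace]
  simp only [List.isEmpty_cons, Bool.false_eq_true, if_false]
  exact replace_go_single k v l.length l [] le_rfl

/-- The nine substitutions of A applied to one character agree with B's table lookup. -/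
lemma char_chain (a : Char) :
    leetSub '!' 'i' (leetSub '7' 't' (leetSub '5' 's' (leetSub '4' 'a' (leetSub '3' 'e'
      (leetSub '$' 's' (leetSub '1' 'l' (leetSub '0' 'o' (leetSub '@' 'a' a)))))))) =
    (PySem.Dict.mk
      [('@', 'a'), ('0', 'o'), ('1', 'l'), ('$', 's'), ('3', 'e'),
       ('4', 'a'), ('5', 's'), ('7', 't'), ('!', 'i')]).getD a a := by
  by_cases h1 : a = '@'; · subst h1; decide
  by_cases h2 : a = '0'; · subst h2; decide
  by_cases h3 : a = '1'; · subst h3; decide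
  by_cases h4 : a = '$'; · subst h4; decide
  by_cases h5 : a = '3'; · subst h5; decide
  by_cases h6 : a = '4'; · subst h6; decide
  by_cases h7 : a = '5'; · subst h7; decide
  by_cases h8 : a = '7'; · subst h8; decide
  by_cases h9 : a = '!'; · subst h9; decide
  have e1 : ('@' == a) = false := by simp [Ne.symm h1]
  have e2 : ('0' == a) = false := by simp [Ne.symm h2]
  have e3 : ('1' == a) = false := by simp [Ne.symm h3]
  have e4 : ('$' == a) = false := by simp [Ne.symm h4]
  have e5 : ('3' == a) = false := by simp [Ne.symm h5]
  have e6 : ('4' == a) = false := by simp [Ne.symm h6]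
  have e7 : ('5' == a) = false := by simp [Ne.symm h7]
  have e8 : ('7' == a) = false := by simp [Ne.symm h8]
  have e9 : ('!' == a) = false := by simp [Ne.symm h9]
  simp only [leetSub, if_neg h1, if_neg h2, if_neg h3, if_neg h4, if_neg h5, if_neg h6,
    if_neg h7, if_neg h8, if_neg h9, PySem.Dict.getD, PySem.Dict.get?, List.find?,
    e1, e2, e3, e4, e5, e6, e7, e8, e9, Option.map_none, Option.getD_none]

/-- The nine maps of A collapse to B's single map. -/
lemma maps_chain (cs : List Char) :
    ((((((((cs.map (leetSub '@' 'a')).map (leetSub '0' 'o')).map (leetSub '1' 'l')).map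
      (leetSub '$' 's')).map (leetSub '3' 'e')).map (leetSub '4' 'a')).map
      (leetSub '5' 's')).map (leetSub '7' 't')).map (leetSub '!' 'i') =
    cs.map (fun c =>
      (PySem.Dict.mk
        [('@', 'a'), ('0', 'o'), ('1', 'l'), ('$', 's'), ('3', 'e'),
         ('4', 'a'), ('5', 's'), ('7', 't'), ('!', 'i')]).getD c c) := by
  induction cs with
  | nil => rfl
  | cons a cs ih =>
    simp only [List.map_cons]
    rw [ih, char_chain a]

-- ===== VERDICT (by name: the statement is the Claim_ definition above) =====
theorem normalize_leet_spec : Claim_equal_normalize_leet := by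
  intro password _
  unfold Spec_normalize_leet normalize_leet normalize_leet_alt
  simp only [List.foldl]
  apply String.toList_injective
  simp only [PySem.Str.toList_replace, String.toList_ofList]
  rw [show ("@" : String).toList = ['@'] from rfl, show ("a" : String).toList = ['a'] from rfl,
      show ("0" : String).toList = ['0'] from rfl, show ("o" : String).toList = ['o'] from rfl,
      show ("1" : String).toList = ['1'] from rfl, show ("l" : String).toList = ['l'] from rfl,
      show ("$" : String).toList = ['$'] from rfl, show ("s" : String).toList = ['s'] from rfl,
      show ("3" : String).toList = ['3'] from rfl, show ("e" : String).toList = ['e'] from rfl,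
      show ("4" : String).toList = ['4'] from rfl,
      show ("5" : String).toList = ['5'] from rfl,
      show ("7" : String).toList = ['7'] from rfl, show ("t" : String).toList = ['t'] from rfl,
      show ("!" : String).toList = ['!'] from rfl, show ("i" : String).toList = ['i'] from rfl]
  rw [replace_single, replace_single, replace_single, replace_single, replace_single,
      replace_single, replace_single, replace_single, replace_single]
  exact maps_chain (PySem.Str.lower password).toList
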